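-- pv_equiv track=rewrite | github.com/rbirenTHOR/rv_trader | src/complete/thor_brand_analysis_v2.py | calculate_tier_ceilings
-- ===== SOURCE A (Python) =====
-- from typing import Optional, Dict, List, Any
--
-- def calculate_tier_ceilings(listings: List[Dict]) -> Dict[str, int]:
--     """
--     Calculate the best achievable rank for each tier.
--
--     Standard listings cannot pass premium listings.
--     Premium listings cannot pass top_premium listings.
--     """
--     top_premium_ranks = [l['rank'] for l in listings if l.get('is_top_premium') and l.get('rank')]
--     premium_ranks = [l['rank'] for l in listings if l.get('is_premium') and not l.get('is_top_premium') and l.get('rank')]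
--
--     # Top premium ceiling is always 1
--     top_premium_ceiling = 1
--
--     # Premium ceiling is after the last top_premium
--     if top_premium_ranks:
--         premium_ceiling = max(top_premium_ranks) + 1
--     else:
--         premium_ceiling = 1
--
--     # Standard ceiling is after the last premium
--     all_premium_ranks = [l['rank'] for l in listings if l.get('is_premium') and l.get('rank')]
--     if all_premium_ranks:
--         standard_ceiling = max(all_premium_ranks) + 1
--     else:
--         standard_ceiling = 1
--
--     return {
--         'top_premium': top_premium_ceiling,
--         'premium': premium_ceiling,
--         'standard': standard_ceiling,
--     }
-- ===== SOURCE B (Python) =====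
-- def calculate_tier_ceilings(listings):
--     """
--     Calculate the best achievable rank for each tier.
--
--     Sort-then-scan: sort the ranked listings once by rank, descending;
--     the best (max) rank of each class is then the first matching entry.
--     """
--     ranked = sorted(
--         ((l['rank'], bool(l.get('is_top_premium')), bool(l.get('is_premium')))
--          for l in listings if l.get('rank')),
--         key=lambda t: t[0], reverse=True)
--     best_top = next((r for r, top, _ in ranked if top), None)
--     best_prem = next((r for r, _, prem in ranked if prem), None)
--     return {
--         'top_premium': 1,
--         'premium': best_top + 1 if best_top is not None else 1,
--         'standard': best_prem + 1 if best_prem is not None else 1,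
--     }
-- ===== Notes on version B (the rewrite author's own statement) =====
-- stated objective: alternative
-- what changed: Replaces the three filter+max() passes (and the unused premium_ranks list) by one sort of the ranked listings by rank descending followed by first-match scans: the first top_premium / premium entry of the sorted list is the maximum.
import Mathlib
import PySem

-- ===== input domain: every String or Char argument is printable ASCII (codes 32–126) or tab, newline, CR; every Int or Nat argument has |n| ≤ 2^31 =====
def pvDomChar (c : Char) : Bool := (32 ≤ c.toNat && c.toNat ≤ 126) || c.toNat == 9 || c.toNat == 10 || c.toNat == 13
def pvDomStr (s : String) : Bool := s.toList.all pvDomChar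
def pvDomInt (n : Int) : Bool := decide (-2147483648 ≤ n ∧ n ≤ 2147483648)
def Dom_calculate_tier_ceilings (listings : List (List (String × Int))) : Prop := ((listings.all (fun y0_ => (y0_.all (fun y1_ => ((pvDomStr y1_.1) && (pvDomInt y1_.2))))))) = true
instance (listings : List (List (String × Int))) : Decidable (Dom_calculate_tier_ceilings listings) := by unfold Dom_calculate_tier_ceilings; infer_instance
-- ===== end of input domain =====

-- B replaces A's three filter+max() passes with one descending sort by rank plus first-match scans (alternative algorithm, same result).


-- shared helpers: Python dict lookup (first match) and Python truthiness of l.get(k)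
def pvGet (l : List (String × Int)) (k : String) : Option Int := (PySem.Dict.mk l).get? k
def pvTruthy (o : Option Int) : Bool := match o with | some v => decide (v ≠ 0) | none => false

-- ===== PORT A =====
-- l['rank'] is read only under the guard that l.get('rank') is truthy, so the key is present; getD 0 is never the default.
def calculate_tier_ceilings (listings : List (List (String × Int))) : List (String × Int) :=
  let top_premium_ranks :=
    (listings.filter (fun l => pvTruthy (pvGet l "is_top_premium") && pvTruthy (pvGet l "rank"))).map
      (fun l => (pvGet l "rank").getD 0)
  let _premium_ranks :=  -- computed by A and never used; kept for faithfulness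
    (listings.filter (fun l => pvTruthy (pvGet l "is_premium") && !pvTruthy (pvGet l "is_top_premium") && pvTruthy (pvGet l "rank"))).map
      (fun l => (pvGet l "rank").getD 0)
  let top_premium_ceiling : Int := 1
  let premium_ceiling : Int :=
    if top_premium_ranks ≠ [] then (PySem.List.max? top_premium_ranks (fun x => x)).getD 0 + 1 else 1
  let all_premium_ranks :=
    (listings.filter (fun l => pvTruthy (pvGet l "is_premium") && pvTruthy (pvGet l "rank"))).map
      (fun l => (pvGet l "rank").getD 0)
  let standard_ceiling : Int :=
    if all_premium_ranks ≠ [] then (PySem.List.max? all_premium_ranks (fun x => x)).getD 0 + 1 else 1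
  [("top_premium", top_premium_ceiling), ("premium", premium_ceiling), ("standard", standard_ceiling)]

-- ===== PORT B =====
-- (rank, bool(is_top_premium), bool(is_premium)) for one listing
def pvTriple (l : List (String × Int)) : Int × Bool × Bool :=
  ((pvGet l "rank").getD 0, pvTruthy (pvGet l "is_top_premium"), pvTruthy (pvGet l "is_premium"))

-- "x + 1 if x is not None else 1"
def pvCeil (o : Option Int) : Int :=
  match o with | some m => m + 1 | none => 1

def calculate_tier_ceilings_alt (listings : List (List (String × Int))) : List (String × Int) :=
  let ranked :=
    PySem.List.sorted ((listings.filter (fun l => pvTruthy (pvGet l "rank"))).map pvTriple)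
      (fun t => t.1) true
  let best_top := (ranked.find? (fun t => t.2.1)).map (fun t => t.1)
  let best_prem := (ranked.find? (fun t => t.2.2)).map (fun t => t.1)
  [("top_premium", (1 : Int)), ("premium", pvCeil best_top), ("standard", pvCeil best_prem)]

-- ===== PRECONDITION & SPEC =====
def Spec_calculate_tier_ceilings (listings : List (List (String × Int))) (out : List (String × Int)) : Prop := out = calculate_tier_ceilings_alt listings
instance (listings : List (List (String × Int))) (out : List (String × Int)) : Decidable (Spec_calculate_tier_ceilings listings out) := by unfold Spec_calculate_tier_ceilings; infer_instance

-- ===== CLAIM (what is proved, stated in full; the proofs are below) =====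
def Claim_equal_calculate_tier_ceilings : Prop := ∀ (listings : List (List (String × Int))), Dom_calculate_tier_ceilings listings → Spec_calculate_tier_ceilings listings (calculate_tier_ceilings listings)

-- ===== LEMMAS AND PROOFS =====

-- A's guarded rank list for a flag = project .1 out of the flagged triples
lemma pvRanks_eq (listings : List (List (String × Int))) (flag : List (String × Int) → Bool)
    (sel : Int × Bool × Bool → Bool)
    (hsel : ∀ l, sel (pvTriple l) = flag l) :
    ((listings.filter (fun l => flag l && pvTruthy (pvGet l "rank"))).map
        (fun l => (pvGet l "rank").getD 0)) =
      ((((listings.filter (fun l => pvTruthy (pvGet l "rank"))).map pvTriple).filter sel).map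
        (fun t => t.1)) := by
  induction listings with
  | nil => rfl
  | cons l t ih =>
    by_cases hr : pvTruthy (pvGet l "rank") <;> by_cases hf : flag l <;>
      (simp [hr, hf, hsel l, ih]; try rfl)

-- max of a value list as Python's "max(xs) if xs else None"
def pvMaxD (xs : List Int) : Option Int :=
  match xs with | [] => none | x :: t => some (t.foldl max x)

-- in a list sorted descending by .1, the first element passing a test has the maximal .1 among passers
lemma pvFind_desc (sel : Int × Bool × Bool → Bool) :
    ∀ (l : List (Int × Bool × Bool)),
      l.Pairwise (fun a b => b.1 ≤ a.1) →
      (l.find? sel).map (fun t => t.1) = pvMaxD ((l.filter sel).map (fun t => t.1)) := by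
  intro l
  induction l with
  | nil => intro _; rfl
  | cons a t ih =>
    intro hp
    rcases List.pairwise_cons.mp hp with ⟨ha, hp'⟩
    by_cases hs : sel a
    · have hmax : ∀ x ∈ ((t.filter sel).map (fun t => t.1)), x ≤ a.1 := by
        intro x hx
        rcases List.mem_map.mp hx with ⟨y, hy, rfl⟩
        exact ha y (List.mem_of_mem_filter hy)
      have hfold : ((t.filter sel).map (fun t => t.1)).foldl max a.1 = a.1 := by
        rcases PySem.List.foldl_max_mem ((t.filter sel).map (fun t => t.1)) a.1 with h | h
        · exact h
        · exact le_antisymm (hmax _ h) (PySem.List.le_foldl_max _ _).1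
      simp [hs, hfold, pvMaxD]
    · simp only [List.find?_cons, hs, List.filter_cons]
      exact ih hp'

-- A's "if xs ≠ [] then max(xs)+1 else 1" = pvCeil of the max-description above
lemma pvCeil_match (xs : List Int) :
    (if xs ≠ [] then (PySem.List.max? xs (fun x => x)).getD 0 + 1 else 1) =
      pvCeil (pvMaxD xs) := by
  cases xs with
  | nil => rfl
  | cons x t => simp [pvCeil, pvMaxD, PySem.List.max?_id_cons]

-- folding max from a seed 'max a b' pulls 'a' out of the fold
lemma pvFoldl_max_max (L : List Int) (a b : Int) :
    L.foldl max (max a b) = max a (L.foldl max b) := by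
  induction L generalizing b with
  | nil => rfl
  | cons x s ih => rw [List.foldl_cons, List.foldl_cons, max_assoc, ih]

-- the match-form of the max is invariant under permutation of the value list
lemma pvMatch_perm {xs ys : List Int} (h : xs.Perm ys) : pvMaxD xs = pvMaxD ys := by
  cases xs with
  | nil => obtain rfl := h.nil_eq; rfl
  | cons x t =>
    cases ys with
    | nil => exact absurd h.symm.nil_eq (by simp)
    | cons y s =>
      show some (t.foldl max x) = some (s.foldl max y)
      congr 1
      have hg : (x :: t).foldl max x = (y :: s).foldl max x := h.foldl_eq x
      have h1 : t.foldl max x = (y :: s).foldl max x := by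
        rw [← hg, List.foldl_cons, max_self]
      have hx : x ∈ y :: s := h.mem_iff.mp List.mem_cons_self
      rcases List.mem_cons.mp hx with rfl | hxs
      · rw [h1, List.foldl_cons, max_self]
      · rw [h1, List.foldl_cons, pvFoldl_max_max]
        exact max_eq_right ((PySem.List.le_foldl_max s y).2 x hxs)

-- one tier: A's filter+max+if form equals B's sort+find form, for any flag read off the triple
lemma pvTier_eq (listings : List (List (String × Int))) (flag : List (String × Int) → Bool)
    (sel : Int × Bool × Bool → Bool)
    (hsel : ∀ l, sel (pvTriple l) = flag l) :
    (if ((listings.filter (fun l => flag l && pvTruthy (pvGet l "rank"))).map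
          (fun l => (pvGet l "rank").getD 0)) ≠ [] then
        (PySem.List.max? ((listings.filter (fun l => flag l && pvTruthy (pvGet l "rank"))).map
          (fun l => (pvGet l "rank").getD 0)) (fun x => x)).getD 0 + 1
      else 1) =
      pvCeil (((PySem.List.sorted ((listings.filter (fun l => pvTruthy (pvGet l "rank"))).map pvTriple)
          (fun t => t.1) true).find? sel).map (fun t => t.1)) := by
  have hp : (PySem.List.sorted ((listings.filter (fun l => pvTruthy (pvGet l "rank"))).map pvTriple)
      (fun t => t.1) true).Pairwise (fun a b => b.1 ≤ a.1) :=
    PySem.List.sorted_pairwise_rev _ _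
  have hperm : (PySem.List.sorted ((listings.filter (fun l => pvTruthy (pvGet l "rank"))).map pvTriple)
      (fun t => t.1) true).Perm ((listings.filter (fun l => pvTruthy (pvGet l "rank"))).map pvTriple) :=
    PySem.List.sorted_perm _ _ _
  rw [pvCeil_match, pvRanks_eq listings flag sel hsel]
  rw [pvFind_desc sel _ hp]
  exact congrArg pvCeil (pvMatch_perm ((hperm.filter sel).map (fun t => t.1))).symm

-- ===== VERDICT (by name: the statement is the Claim_ definition above) =====
theorem calculate_tier_ceilings_spec : Claim_equal_calculate_tier_ceilings := by
  intro listings _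
  show calculate_tier_ceilings listings = calculate_tier_ceilings_alt listings
  simp only [calculate_tier_ceilings, calculate_tier_ceilings_alt]
  rw [pvTier_eq listings (fun l => pvTruthy (pvGet l "is_top_premium")) (fun t => t.2.1) (fun l => rfl),
      pvTier_eq listings (fun l => pvTruthy (pvGet l "is_premium")) (fun t => t.2.2) (fun l => rfl)]
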